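-- pv_equiv track=rewrite | github.com/VidhyaPonnusamy-gce/Mount-Blue-job-challenge-codes | Mount-blue-sec9-5.py | game_throne
-- ===== SOURCE A (Python) =====
-- def game_throne(s):
--     freq={}
--     for i in s:
--         if i in freq:
--             freq[i]+=1
--         else:
--             freq[i]=1
--     count=0
--     for v in freq.values():
--         if v%2!=0:
--             count+=1
--     if count>0:
--         return "NO"
--     else:
--         return "YES"
-- ===== SOURCE B (Python) =====
-- def game_throne(s):
--     # Single pass keeping only a parity set: a char is in `seen`
--     # iff it has occurred an odd number of times so far.
--     seen = set()
--     for c in s: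
--         if c in seen:
--             seen.remove(c)
--         else:
--             seen.add(c)
--     return "YES" if not seen else "NO"
-- ===== Notes on version B (the rewrite author's own statement) =====
-- stated objective: simpler
-- what changed: Replaces the frequency dict plus a second pass over its values with a single pass maintaining a parity set (toggle each char in/out); answer is whether the set is empty.
import Mathlib
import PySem

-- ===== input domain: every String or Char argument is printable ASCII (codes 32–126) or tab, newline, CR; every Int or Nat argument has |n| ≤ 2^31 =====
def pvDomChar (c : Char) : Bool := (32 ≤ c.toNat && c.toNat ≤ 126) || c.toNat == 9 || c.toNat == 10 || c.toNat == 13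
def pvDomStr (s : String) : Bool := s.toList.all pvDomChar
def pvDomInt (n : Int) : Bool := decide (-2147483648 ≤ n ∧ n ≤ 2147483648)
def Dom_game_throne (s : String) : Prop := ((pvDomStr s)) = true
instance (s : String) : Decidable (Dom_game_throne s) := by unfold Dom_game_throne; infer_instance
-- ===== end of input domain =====

-- B replaces A's frequency dict + second pass over its values by a single pass
-- maintaining a parity set (toggle each char in/out); same result, simpler state.

-- ===== PORT A =====
def game_throne (s : String) : String :=
  let freq := s.toList.foldl
    (fun d i => if d.contains i then d.insert i (d.getD i 0 + 1) else d.insert i 1)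
    (PySem.Dict.empty : PySem.Dict Char Int)
  let count := freq.values.foldl
    (fun c v => if PySem.Int.mod v 2 ≠ 0 then c + 1 else c) (0 : Int)
  if count > 0 then "NO" else "YES"

-- ===== PORT B =====
-- `seen.remove(c)` runs only under the `c in seen` guard, where it equals discard (no KeyError).
def game_throne_alt (s : String) : String :=
  let seen := s.toList.foldl
    (fun st c => if PySem.Set.contains st c then PySem.Set.discard st c else PySem.Set.add st c)
    (PySem.Set.empty : PySem.Set Char)
  if seen.isEmpty then "YES" else "NO"

-- ===== PRECONDITION & SPEC =====
def Spec_game_throne (s : String) (out : String) : Prop := out = game_throne_alt s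
instance (s : String) (out : String) : Decidable (Spec_game_throne s out) := by unfold Spec_game_throne; infer_instance

-- ===== CLAIM (what is proved, stated in full; the proofs are below) =====
def Claim_equal_game_throne : Prop := ∀ (s : String), Dom_game_throne s → Spec_game_throne s (game_throne s)

-- ===== LEMMAS AND PROOFS =====

-- A's dict-building loop builds the counter.
theorem freqA_eq_counter (xs : List Char) :
    xs.foldl (fun d i => if d.contains i then d.insert i (d.getD i 0 + 1) else d.insert i 1)
        (PySem.Dict.empty : PySem.Dict Char Int)
      = PySem.Dict.counter xs := by
  have hf : (fun (d : PySem.Dict Char Int) i =>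
      if d.contains i then d.insert i (d.getD i 0 + 1) else d.insert i 1)
        = fun d i => d.insert i (d.getD i 0 + 1) := by
    funext d i
    by_cases h : d.contains i = true
    · rw [if_pos h]
    · rw [if_neg (by simp [h]), PySem.Dict.getD_of_not_contains d _ (by simpa using h)]
      norm_num
  rw [hf, PySem.Dict.foldl_insert_getD_add_one_eq_counter]

-- A's counting loop counts the odd values.
theorem countA_eq_countP (vs : List Int) (n : Int) :
    vs.foldl (fun c v => if PySem.Int.mod v 2 ≠ 0 then c + 1 else c) n
      = n + (vs.countP (fun v => decide (PySem.Int.mod v 2 ≠ 0)) : Int) := by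
  induction vs generalizing n with
  | nil => simp
  | cons v vs ih =>
    rw [List.foldl_cons, List.countP_cons, ih]
    by_cases h : PySem.Int.mod v 2 ≠ 0
    · rw [if_pos h, if_pos (by simpa using h)]; push_cast; ring
    · rw [if_neg h, if_neg (by simpa using h)]; push_cast; ring

theorem mod_two_ne_zero_iff (n : Nat) : PySem.Int.mod (n : Int) 2 ≠ 0 ↔ n % 2 = 1 := by
  rw [PySem.Int.mod_eq_emod_of_pos (by norm_num)]
  omega

-- A answers "NO" exactly when some character occurs an odd number of times.
theorem a_pos_iff (xs : List Char) :
    (0 : Int) < ((xs.foldl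
        (fun d i => if d.contains i then d.insert i (d.getD i 0 + 1) else d.insert i 1)
        (PySem.Dict.empty : PySem.Dict Char Int)).values.foldl
          (fun c v => if PySem.Int.mod v 2 ≠ 0 then c + 1 else c) (0 : Int))
      ↔ ∃ c ∈ xs, xs.count c % 2 = 1 := by
  rw [freqA_eq_counter]
  have hvals : (PySem.Dict.counter xs).values
      = (PySem.Set.ofList xs).map (fun k => (xs.count k : Int)) := by
    show ((PySem.Dict.counter xs).items).map (·.2) = _
    rw [PySem.Dict.items_counter]
    simp [List.map_map, Function.comp]
  rw [hvals, countA_eq_countP, zero_add, Int.natCast_pos, List.countP_pos_iff]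
  constructor
  · rintro ⟨v, hv, hp⟩
    rcases List.mem_map.mp hv with ⟨k, hk, rfl⟩
    exact ⟨k, (PySem.Set.mem_ofList xs k).mp hk, (mod_two_ne_zero_iff _).mp (by simpa using hp)⟩
  · rintro ⟨c, hc, hodd⟩
    exact ⟨(xs.count c : Int), List.mem_map.mpr ⟨c, (PySem.Set.mem_ofList xs c).mpr hc, rfl⟩,
      by simpa using (mod_two_ne_zero_iff (xs.count c)).mpr hodd⟩

-- B's toggle loop: membership in the final set is the parity of the count.
theorem toggle_mem (xs : List Char) (st : PySem.Set Char) (c : Char) :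
    (c ∈ xs.foldl
      (fun st c => if PySem.Set.contains st c then PySem.Set.discard st c else PySem.Set.add st c)
      st)
    ↔ ((c ∈ st) ↔ xs.count c % 2 = 0) := by
  induction xs generalizing st with
  | nil => simp
  | cons y ys ih =>
    rw [List.foldl_cons, ih]
    have hstep : (c ∈ (if PySem.Set.contains st y then PySem.Set.discard st y else PySem.Set.add st y))
        ↔ (if c = y then ¬ (c ∈ st) else c ∈ st) := by
      by_cases hc : PySem.Set.contains st y = true
      · have hy : y ∈ st := by simpa [PySem.Set.contains] using hc
        rw [if_pos hc, PySem.Set.mem_discard]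
        by_cases hcy : c = y <;> simp [hcy, hy]
      · have hy : y ∉ st := by simpa [PySem.Set.contains] using hc
        rw [if_neg hc, PySem.Set.mem_add]
        by_cases hcy : c = y <;> simp [hcy, hy]
    rw [hstep]
    by_cases hcy : c = y
    · subst hcy
      rw [if_pos rfl, List.count_cons_self]
      by_cases hm : c ∈ st <;> simp [hm] <;> omega
    · rw [if_neg hcy, List.count_cons_of_ne (fun h => hcy h.symm)]

-- B answers "YES" exactly when no character occurs an odd number of times.
theorem b_empty_iff (xs : List Char) :
    (xs.foldl
      (fun st c => if PySem.Set.contains st c then PySem.Set.discard st c else PySem.Set.add st c)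
      (PySem.Set.empty : PySem.Set Char)).isEmpty = true
    ↔ ¬ ∃ c ∈ xs, xs.count c % 2 = 1 := by
  rw [List.isEmpty_iff, List.eq_nil_iff_forall_not_mem]
  constructor
  · rintro h ⟨c, hc, hodd⟩
    exact h c ((toggle_mem xs PySem.Set.empty c).mpr (by simp [PySem.Set.empty]; omega))
  · intro h c hmem
    have hiff := (toggle_mem xs PySem.Set.empty c).mp hmem
    simp [PySem.Set.empty] at hiff
    have hc : c ∈ xs := List.count_pos_iff.mp (by omega)
    exact h ⟨c, hc, by omega⟩

-- ===== VERDICT (by name: the statement is the Claim_ definition above) =====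
theorem game_throne_spec : Claim_equal_game_throne := by
  intro s _
  show game_throne s = game_throne_alt s
  simp only [game_throne, game_throne_alt]
  by_cases h : ∃ c ∈ s.toList, s.toList.count c % 2 = 1
  · rw [if_pos ((a_pos_iff s.toList).mpr h), if_neg (fun hh => ((b_empty_iff s.toList).mp hh) h)]
  · rw [if_neg (fun hh => h ((a_pos_iff s.toList).mp hh)), if_pos ((b_empty_iff s.toList).mpr h)]
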